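-- pv_equiv track=rewrite | github.com/zshcatsandevops/programs-2025 | ultrasmb4k.py | _stripe_v
-- ===== SOURCE A (Python) =====
-- from typing import Dict, List, Optional, Tuple
--
-- def _stripe_v(a: int, b: int, w: int=2) -> List[List[int]]:
--     pat = []
--     for y in range(8):
--         row = []
--         for x in range(8):
--             row.append(a if (x % (w*2) < w) else b)
--         pat.append(row)
--     return pat
-- ===== SOURCE B (Python) =====
-- def _stripe_v(a, b, w=2):
--     # Build the pattern column-major: each column x is a constant column of
--     # 8 copies of its stripe colour; transpose the column list to get rows.
--     cols = [[a if x % (w * 2) < w else b] * 8 for x in range(8)]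
--     return [list(r) for r in zip(*cols)]
-- ===== Notes on version B (the rewrite author's own statement) =====
-- stated objective: alternative
-- what changed: B builds the pattern column-major (each of the 8 columns is a constant 8-copy column of its stripe colour) and then transposes via zip to obtain the rows, instead of A's row-major nested double loop appending cell by cell.
import Mathlib
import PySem

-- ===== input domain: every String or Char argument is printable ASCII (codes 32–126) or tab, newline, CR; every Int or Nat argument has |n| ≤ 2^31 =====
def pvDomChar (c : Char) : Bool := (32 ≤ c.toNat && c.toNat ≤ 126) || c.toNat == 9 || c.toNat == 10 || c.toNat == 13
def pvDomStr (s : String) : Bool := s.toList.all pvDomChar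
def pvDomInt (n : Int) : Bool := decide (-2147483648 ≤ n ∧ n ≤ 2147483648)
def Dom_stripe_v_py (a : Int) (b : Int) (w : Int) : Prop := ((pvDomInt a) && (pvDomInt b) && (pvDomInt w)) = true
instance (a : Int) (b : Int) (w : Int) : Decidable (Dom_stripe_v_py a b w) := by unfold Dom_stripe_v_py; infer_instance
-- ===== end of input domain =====

-- B builds the grid column-major (8 constant columns) and transposes, instead of
-- A's row-major nested double loop (objective: alternative construction).

-- ===== PORT A =====
def stripe_v_py (a : Int) (b : Int) (w : Int) : List (List Int) :=
  (PySem.List.pyRange 0 8 1).foldl (fun pat _y =>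
    pat ++ [(PySem.List.pyRange 0 8 1).foldl (fun row x =>
      row ++ [if PySem.Int.mod x (w * 2) < w then a else b]) []]) []

-- ===== PORT B =====
-- hand port of Python's zip(*cols): emit the tuple of heads while every list is
-- nonempty (zip stops at the shortest iterable); fuel 8 = column height, only for totality
def pvZipStar : Nat → List (List Int) → List (List Int)
  | 0, _ => []
  | n + 1, cols =>
    if cols ≠ [] ∧ cols.all (fun c => c ≠ []) then
      cols.map (fun c => c.headI) :: pvZipStar n (cols.map (fun c => c.tail))
    else []

def stripe_v_py_alt (a : Int) (b : Int) (w : Int) : List (List Int) :=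
  let cols := (PySem.List.pyRange 0 8 1).map (fun x =>
    List.replicate 8 (if PySem.Int.mod x (w * 2) < w then a else b))
  -- '[list(r) for r in zip(*cols)]': each row is an independent copy
  (pvZipStar 8 cols).map (fun r => r.map id)

-- ===== PRECONDITION & SPEC =====
-- Pre_ excludes exactly w = 0, where Python's 'x % (w*2)' raises ZeroDivisionError (in both A and B).
def Pre_stripe_v_py (a : Int) (b : Int) (w : Int) : Prop := w ≠ 0
instance (a : Int) (b : Int) (w : Int) : Decidable (Pre_stripe_v_py a b w) := by unfold Pre_stripe_v_py; infer_instance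
def pvWitness_stripe_v_py : Int × Int × Int := (1, 0, 2)
def Spec_stripe_v_py (a : Int) (b : Int) (w : Int) (out : List (List Int)) : Prop := out = stripe_v_py_alt a b w
instance (a : Int) (b : Int) (w : Int) (out : List (List Int)) : Decidable (Spec_stripe_v_py a b w out) := by unfold Spec_stripe_v_py; infer_instance

-- ===== CLAIM =====
def Claim_equal_stripe_v_py : Prop := ∀ (a : Int) (b : Int) (w : Int), Dom_stripe_v_py a b w → Pre_stripe_v_py a b w → Spec_stripe_v_py a b w (stripe_v_py a b w)

-- ===== LEMMAS AND PROOFS =====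
theorem pvRange8 : PySem.List.pyRange 0 8 1 = [0, 1, 2, 3, 4, 5, 6, 7] := by decide

-- ===== VERDICT =====
theorem stripe_v_py_spec : Claim_equal_stripe_v_py := by
  intro a b w _ _
  unfold Spec_stripe_v_py stripe_v_py stripe_v_py_alt
  rw [pvRange8]
  simp only [List.foldl, List.map, List.replicate]
  generalize (if PySem.Int.mod 0 (w * 2) < w then a else b) = v0
  generalize (if PySem.Int.mod 1 (w * 2) < w then a else b) = v1
  generalize (if PySem.Int.mod 2 (w * 2) < w then a else b) = v2
  generalize (if PySem.Int.mod 3 (w * 2) < w then a else b) = v3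
  generalize (if PySem.Int.mod 4 (w * 2) < w then a else b) = v4
  generalize (if PySem.Int.mod 5 (w * 2) < w then a else b) = v5
  generalize (if PySem.Int.mod 6 (w * 2) < w then a else b) = v6
  generalize (if PySem.Int.mod 7 (w * 2) < w then a else b) = v7
  simp [pvZipStar, List.headI]
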